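-- pv_equiv track=rewrite | github.com/matyaslagos/analogical-path-model | rm.py | ctxt_dy
-- ===== SOURCE A (Python) =====
-- from collections import defaultdict
--
-- def splits(data):
--     return [((item[0][:i], item[0][i:]), int(item[1])) for item in data for i in range(0,len(item[0])+1)]
--
-- def ctxt_dy(data):
--     fw = defaultdict(lambda: defaultdict(int))
--     bw = defaultdict(lambda: defaultdict(int))
--     for split, freq in splits(data):
--         ctxt, goal = split
--         fw[ctxt][goal] += freq
--         bw[goal][ctxt] += freq
--     fw = {key: dict(fw[key]) for key in fw}
--     bw = {key: dict(bw[key]) for key in bw}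
--     return {'fw': fw, 'bw': bw}
-- ===== SOURCE B (Python) =====
-- def ctxt_dy(data):
--     triples = [(w[:i], w[i:], int(f)) for w, f in data for i in range(0, len(w) + 1)]
--     def index(pairs):
--         return {k: {g: sum(f2 for k2, g2, f2 in pairs if k2 == k and g2 == g)
--                     for g in dict.fromkeys(g2 for k2, g2, _ in pairs if k2 == k)}
--                 for k in dict.fromkeys(k2 for k2, _, _ in pairs)}
--     return {'fw': index(triples),
--             'bw': index([(g, c, f) for c, g, f in triples])}
-- ===== Notes on version B (the rewrite author's own statement) =====
-- stated objective: alternative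
-- what changed: A accumulates fw and bw incrementally in nested defaultdicts over the split stream; B materialises the split triples once and builds each table declaratively by first-occurrence deduplication of keys with a sum comprehension per (context, goal) pair, deriving bw by re-indexing the swapped triples.
import Mathlib
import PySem

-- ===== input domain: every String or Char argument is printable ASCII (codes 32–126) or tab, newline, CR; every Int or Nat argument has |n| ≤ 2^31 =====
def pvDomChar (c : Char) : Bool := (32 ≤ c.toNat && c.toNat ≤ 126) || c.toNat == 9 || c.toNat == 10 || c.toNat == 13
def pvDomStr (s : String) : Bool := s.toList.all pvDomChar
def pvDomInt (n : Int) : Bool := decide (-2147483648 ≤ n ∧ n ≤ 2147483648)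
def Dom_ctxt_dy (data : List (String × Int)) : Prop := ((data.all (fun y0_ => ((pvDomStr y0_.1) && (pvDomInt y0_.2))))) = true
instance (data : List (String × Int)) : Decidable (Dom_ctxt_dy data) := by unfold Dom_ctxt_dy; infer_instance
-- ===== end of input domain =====

-- B replaces A's incremental defaultdict accumulation by a dedup-then-sum comprehension
-- (first-occurrence key lists with summed frequencies); objective: alternative, not faster.

-- ===== PORT A =====
-- splits(data): [((w[:i], w[i:]), int(f)) for (w, f) in data for i in range(0, len(w)+1)]
-- (int(f) on an int is the identity, ported as item.2)
def pv_splits (data : List (String × Int)) : List ((String × String) × Int) :=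
  data.flatMap (fun item =>
    (PySem.List.pyRange 0 (PySem.Str.len item.1 + 1) 1).map
      (fun i => ((PySem.Str.slice item.1 none (some i), PySem.Str.slice item.1 (some i) none), item.2)))

-- fw[ctxt][goal] += freq on a defaultdict is Dict.modify with empty/0 defaults (key appended on first access)
def ctxt_dy (data : List (String × Int)) : List (String × List (String × List (String × Int))) :=
  let st := (pv_splits data).foldl
    (fun (st : PySem.Dict String (PySem.Dict String Int) × PySem.Dict String (PySem.Dict String Int)) p =>
      (st.1.modify p.1.1 PySem.Dict.empty (fun inner => inner.modify p.1.2 0 (· + p.2)),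
       st.2.modify p.1.2 PySem.Dict.empty (fun inner => inner.modify p.1.1 0 (· + p.2))))
    (PySem.Dict.empty, PySem.Dict.empty)
  [("fw", st.1.items.map (fun q => (q.1, q.2.items))),
   ("bw", st.2.items.map (fun q => (q.1, q.2.items)))]

-- ===== PORT B =====
-- triples = [(w[:i], w[i:], int(f)) for (w, f) in data for i in range(0, len(w)+1)]
def pv_triples (data : List (String × Int)) : List (String × String × Int) :=
  data.flatMap (fun wf =>
    (PySem.List.pyRange 0 (PySem.Str.len wf.1 + 1) 1).map
      (fun i => (PySem.Str.slice wf.1 none (some i), PySem.Str.slice wf.1 (some i) none, wf.2)))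

-- index(pairs): {k: {g: sum(...) for g in dict.fromkeys(...)} for k in dict.fromkeys(...)}
def pv_index (pairs : List (String × String × Int)) : List (String × List (String × Int)) :=
  (PySem.Set.ofList (pairs.map (fun t => t.1))).map (fun k =>
    (k, (PySem.Set.ofList ((pairs.filter (fun t => t.1 == k)).map (fun t => t.2.1))).map (fun g =>
      (g, ((pairs.filter (fun t => t.1 == k && t.2.1 == g)).map (fun t => t.2.2)).sum))))

def ctxt_dy_alt (data : List (String × Int)) : List (String × List (String × List (String × Int))) :=
  let triples := pv_triples data
  [("fw", pv_index triples),
   ("bw", pv_index (triples.map (fun t => (t.2.1, t.1, t.2.2))))]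

-- ===== PRECONDITION & SPEC =====
def Spec_ctxt_dy (data : List (String × Int)) (out : List (String × List (String × List (String × Int)))) : Prop := out = ctxt_dy_alt data
instance (data : List (String × Int)) (out : List (String × List (String × List (String × Int)))) : Decidable (Spec_ctxt_dy data out) := by unfold Spec_ctxt_dy; infer_instance

-- ===== CLAIM (what is proved, stated in full; the proofs are below) =====
def Claim_equal_ctxt_dy : Prop := ∀ (data : List (String × Int)), Dom_ctxt_dy data → Spec_ctxt_dy data (ctxt_dy data)

-- ===== LEMMAS AND PROOFS =====

-- the dedup-then-sum grouping, over arbitrary projections of the stream elements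
def pvGrp {τ : Type} (l : List τ) (c g : τ → String) (f : τ → Int) : List (String × List (String × Int)) :=
  (PySem.Set.ofList (l.map c)).map (fun k =>
    (k, (PySem.Set.ofList ((l.filter (fun t => c t == k)).map g)).map (fun s =>
      (s, ((l.filter (fun t => c t == k && g t == s)).map f).sum))))

lemma pv_getD_foldl_modify_key {τ ν : Type} (l : List τ) (key : τ → String) (d0 : ν)
    (F : τ → ν → ν) (d : PySem.Dict String ν) (k : String) :
    (l.foldl (fun d a => d.modify (key a) d0 (F a)) d).getD k d0
      = (l.filter (fun a => key a == k)).foldl (fun v a => F a v) (d.getD k d0) := by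
  induction l generalizing d with
  | nil => rfl
  | cons a l ih =>
    simp only [List.foldl_cons, List.filter_cons, ih]
    by_cases h : key a = k
    · subst h
      simp only [beq_self_eq_true, if_true, List.foldl_cons, PySem.Dict.getD_modify_self]
    · have hb : (key a == k) = false := by simp [h]
      rw [hb, PySem.Dict.getD_modify]
      simp only [Bool.false_eq_true, if_false]
      rw [if_neg (fun hh => h hh.symm)]

lemma pv_inner {τ : Type} (lk : List τ) (g : τ → String) (f : τ → Int) :
    (lk.foldl (fun inner t => inner.modify (g t) 0 (· + f t)) PySem.Dict.empty).items
      = (PySem.Set.ofList (lk.map g)).map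
          (fun s => (s, ((lk.filter (fun t => g t == s)).map f).sum)) := by
  have hk : (lk.foldl (fun inner t => inner.modify (g t) 0 (· + f t)) PySem.Dict.empty).keys
      = PySem.Set.ofList (lk.map g) := by
    rw [PySem.Dict.keys_foldl_modify_key]
    simp [PySem.Dict.keys_empty, PySem.Set.update_nil_left]
  have hnd : (lk.foldl (fun inner t => inner.modify (g t) 0 (· + f t)) PySem.Dict.empty).keys.Nodup := by
    exact PySem.Dict.nodup_keys_foldl_modify_key _ _ _ _ _ (by simp [PySem.Dict.keys_empty])
  rw [PySem.Dict.items_eq_map_keys _ hnd 0, hk]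
  apply List.map_congr_left
  intro s _
  congr 1
  rw [pv_getD_foldl_modify_key lk g 0 (fun t v => v + f t) PySem.Dict.empty s]
  rw [PySem.List.foldl_add]
  simp [PySem.Dict.getD_empty]

-- the nested defaultdict loop produces exactly the dedup-then-sum grouping
lemma pv_main {τ : Type} (l : List τ) (c g : τ → String) (f : τ → Int) :
    ((l.foldl (fun d t => d.modify (c t) PySem.Dict.empty
        (fun inner => inner.modify (g t) 0 (· + f t))) PySem.Dict.empty).items.map
      (fun q => (q.1, q.2.items)))
      = pvGrp l c g f := by
  have hk : (l.foldl (fun d t => d.modify (c t) PySem.Dict.empty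
        (fun inner => inner.modify (g t) 0 (· + f t))) PySem.Dict.empty).keys
      = PySem.Set.ofList (l.map c) := by
    rw [PySem.Dict.keys_foldl_modify_key]
    simp [PySem.Dict.keys_empty, PySem.Set.update_nil_left]
  have hnd : (l.foldl (fun d t => d.modify (c t) PySem.Dict.empty
        (fun inner => inner.modify (g t) 0 (· + f t))) PySem.Dict.empty).keys.Nodup := by
    exact PySem.Dict.nodup_keys_foldl_modify_key _ _ _ _ _ (by simp [PySem.Dict.keys_empty])
  rw [PySem.Dict.items_eq_map_keys _ hnd PySem.Dict.empty, hk, List.map_map, pvGrp]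
  apply List.map_congr_left
  intro k _
  simp only [Function.comp_apply]
  rw [pv_getD_foldl_modify_key l c PySem.Dict.empty
      (fun t inner => inner.modify (g t) 0 (· + f t)) PySem.Dict.empty k]
  rw [PySem.Dict.getD_empty]
  rw [pv_inner (l.filter (fun t => c t == k)) g f]
  congr 1
  apply List.map_congr_left
  intro s _
  congr 2
  rw [List.filter_filter]
  congr 1
  apply List.filter_congr
  intro t _
  exact Bool.and_comm _ _

lemma pv_stream_eq (data : List (String × Int)) :
    pv_splits data = (pv_triples data).map (fun t => ((t.1, t.2.1), t.2.2)) := by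
  simp only [pv_splits, pv_triples, List.map_flatMap, List.map_map]
  rfl

lemma pv_index_map {τ : Type} (l : List τ) (e : τ → String × String × Int) :
    pv_index (l.map e) = pvGrp l (fun t => (e t).1) (fun t => (e t).2.1) (fun t => (e t).2.2) := by
  simp only [pv_index, pvGrp, List.map_map, List.filter_map, Function.comp_def]

lemma pv_index_id (l : List (String × String × Int)) :
    pv_index l = pvGrp l (fun t => t.1) (fun t => t.2.1) (fun t => t.2.2) := by
  rfl

-- ===== VERDICT (by name: the statement is the Claim_ definition above) =====
theorem ctxt_dy_spec : Claim_equal_ctxt_dy := by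
  intro data _
  unfold Spec_ctxt_dy ctxt_dy ctxt_dy_alt
  rw [pv_stream_eq data]
  set l := pv_triples data
  rw [List.foldl_map]
  have hfold : (l.foldl (fun st (t : String × String × Int) =>
      (st.1.modify t.1 PySem.Dict.empty (fun inner => inner.modify t.2.1 0 (· + t.2.2)),
       st.2.modify t.2.1 PySem.Dict.empty (fun inner => inner.modify t.1 0 (· + t.2.2))))
      ((PySem.Dict.empty : PySem.Dict String (PySem.Dict String Int)), (PySem.Dict.empty : PySem.Dict String (PySem.Dict String Int))))
      = (l.foldl (fun d t => d.modify t.1 PySem.Dict.empty (fun inner => inner.modify t.2.1 0 (· + t.2.2))) PySem.Dict.empty,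
         l.foldl (fun d t => d.modify t.2.1 PySem.Dict.empty (fun inner => inner.modify t.1 0 (· + t.2.2))) PySem.Dict.empty) := by
    exact PySem.List.foldl_prod_mk
      (f := fun d (t : String × String × Int) => d.modify t.1 PySem.Dict.empty (fun inner => inner.modify t.2.1 0 (· + t.2.2)))
      (g := fun d (t : String × String × Int) => d.modify t.2.1 PySem.Dict.empty (fun inner => inner.modify t.1 0 (· + t.2.2)))
      l PySem.Dict.empty PySem.Dict.empty
  rw [hfold]
  simp only []
  rw [pv_main l (fun t => t.1) (fun t => t.2.1) (fun t => t.2.2),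
      pv_main l (fun t => t.2.1) (fun t => t.1) (fun t => t.2.2),
      pv_index_id, pv_index_map]
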